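-- pv_equiv track=rewrite | github.com/Aksh0393/leetcode | medium/1504.py | countOnesSubArray
-- ===== SOURCE A (Python) =====
-- def countOnesSubArray(arr) -> int:
--     count = 0
--     curr = 0
--     for num in arr:
--         if num == 1:
--             curr += 1
--         else:
--             curr = 0
--
--         count += curr
--
--     return count
-- ===== SOURCE B (Python) =====
-- def countOnesSubArray(arr) -> int:
--     total = 0
--     i = 0
--     n = len(arr)
--     while i < n:
--         if arr[i] == 1:
--             j = i
--             while j < n and arr[j] == 1:
--                 j += 1
--             k = j - i
--             total += k * (k + 1) // 2
--             i = j
--         else: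
--             i += 1
--     return total
-- ===== Notes on version B (the rewrite author's own statement) =====
-- stated objective: alternative
-- what changed: Replaces the per-element running-counter accumulation with a run-scanning loop that finds each maximal run of ones and adds its triangular number k*(k+1)//2 in closed form.
import Mathlib
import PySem

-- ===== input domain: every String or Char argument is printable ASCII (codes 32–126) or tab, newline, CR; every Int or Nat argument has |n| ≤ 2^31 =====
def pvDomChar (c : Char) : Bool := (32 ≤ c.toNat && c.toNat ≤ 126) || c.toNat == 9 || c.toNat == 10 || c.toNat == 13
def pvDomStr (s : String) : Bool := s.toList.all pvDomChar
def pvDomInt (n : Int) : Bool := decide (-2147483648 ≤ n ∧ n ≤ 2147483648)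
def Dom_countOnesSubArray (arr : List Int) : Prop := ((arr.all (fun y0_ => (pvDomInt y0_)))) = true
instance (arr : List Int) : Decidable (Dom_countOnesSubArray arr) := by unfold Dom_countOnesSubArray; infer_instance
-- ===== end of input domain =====

-- B replaces A's per-element running counter with a run-scanning loop adding k*(k+1)//2 per maximal run of ones (alternative decomposition, same O(n) cost).

-- ===== PORT A =====
-- running pair (count, curr), exactly A's loop
def countOnesSubArray (arr : List Int) : Int :=
  (arr.foldl
    (fun (st : Int × Int) num =>
      let curr := if num = 1 then st.2 + 1 else (0 : Int)
      (st.1 + curr, curr)) (0, 0)).1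

-- ===== PORT B =====
-- Source B's outer while loop: skip a non-one, or scan a whole run of ones and add its triangular number
def countOnesGo : List Int → Int
  | [] => 0
  | x :: xs =>
    if x = 1 then
      let k : Int := ((xs.takeWhile (fun y => y == 1)).length : Int) + 1
      PySem.Int.floordiv (k * (k + 1)) 2 + countOnesGo (xs.dropWhile (fun y => y == 1))
    else countOnesGo xs
termination_by l => l.length
decreasing_by
  · have := List.length_dropWhile_le (fun y : Int => y == 1) xs
    simpa using Nat.lt_succ_of_le this
  · simp

def countOnesSubArray_alt (arr : List Int) : Int := countOnesGo arr

-- ===== PRECONDITION & SPEC =====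
def Spec_countOnesSubArray (arr : List Int) (out : Int) : Prop := out = countOnesSubArray_alt arr
instance (arr : List Int) (out : Int) : Decidable (Spec_countOnesSubArray arr out) := by unfold Spec_countOnesSubArray; infer_instance

-- ===== CLAIM (what is proved, stated in full; the proofs are below) =====
def Claim_equal_countOnesSubArray : Prop := ∀ (arr : List Int), Dom_countOnesSubArray arr → Spec_countOnesSubArray arr (countOnesSubArray arr)

-- ===== LEMMAS AND PROOFS =====

-- A's loop step
def pvStep (st : Int × Int) (num : Int) : Int × Int :=
  let curr := if num = 1 then st.2 + 1 else (0 : Int)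
  (st.1 + curr, curr)

-- triangular numbers, recursively
def pvTri : Nat → Int
  | 0 => 0
  | n + 1 => pvTri n + (n + 1)

lemma pvTri_two_mul (n : Nat) : 2 * pvTri n = (n : Int) * (n + 1) := by
  induction n with
  | zero => simp [pvTri]
  | succ m ih => simp only [pvTri]; push_cast; push_cast at ih; ring_nf; ring_nf at ih; linarith

lemma pvTri_floordiv (n : Nat) :
    PySem.Int.floordiv ((n : Int) * ((n : Int) + 1)) 2 = pvTri n := by
  rw [PySem.Int.floordiv_eq_ediv_of_pos (by norm_num), ← pvTri_two_mul n]
  exact Int.mul_ediv_cancel_left _ (by norm_num)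

lemma fold_ones (m : Nat) : ∀ c j : Int,
    List.foldl pvStep (c, j) (List.replicate m 1) = (c + m * j + pvTri m, j + m) := by
  induction m with
  | zero => simp [pvTri]
  | succ p ih =>
    intro c j
    rw [List.replicate_succ, List.foldl_cons]
    show List.foldl pvStep (pvStep (c, j) 1) _ = _
    rw [show pvStep (c, j) 1 = (c + (j + 1), j + 1) by simp [pvStep]]
    rw [ih]
    simp only [Prod.mk.injEq, pvTri]
    constructor <;> · push_cast; ring

lemma dropWhile_head_false {α : Type} (p : α → Bool) :
    ∀ (l : List α) y r, l.dropWhile p = y :: r → p y = false := by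
  intro l
  induction l with
  | nil => intro y r h; simp at h
  | cons x xs ih =>
    intro y r h
    by_cases hx : p x
    · rw [List.dropWhile_cons_of_pos hx] at h; exact ih y r h
    · rw [List.dropWhile_cons_of_neg hx] at h
      cases h; simpa using hx

lemma countOnes_main (l : List Int) : ∀ c : Int,
    (List.foldl pvStep (c, 0) l).1 = c + countOnesGo l := by
  induction l using countOnesGo.induct with
  | case1 => simp [countOnesGo]
  | case2 xs ih =>
    intro c
    have hR : countOnesGo (1 :: xs)
        = PySem.Int.floordiv ((((xs.takeWhile (fun y => y == 1)).length : Int) + 1)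
            * (((xs.takeWhile (fun y => y == 1)).length : Int) + 1 + 1)) 2
          + countOnesGo (xs.dropWhile (fun y => y == 1)) := by
      rw [countOnesGo]
      simp
    rw [hR]
    rw [List.foldl_cons]
    rw [show pvStep (c, 0) 1 = (c + 1, 1) by simp [pvStep]]
    have hsplit : xs = xs.takeWhile (fun y => y == 1) ++ xs.dropWhile (fun y => y == 1) :=
      (List.takeWhile_append_dropWhile).symm
    have hrep : xs.takeWhile (fun y => y == 1)
        = List.replicate (xs.takeWhile (fun y => y == 1)).length 1 := by
      apply List.eq_replicate_of_mem
      intro b hb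
      have := List.mem_takeWhile_imp hb
      simpa using this
    conv_lhs => rw [hsplit, List.foldl_append, hrep, fold_ones]
    generalize hm : (xs.takeWhile (fun y => y == 1)).length = m
    generalize hrest : xs.dropWhile (fun y => y == 1) = rest
    rw [hrest] at ih
    have hfd : PySem.Int.floordiv (((m : Int) + 1) * ((m : Int) + 1 + 1)) 2 = pvTri (m + 1) := by
      have := pvTri_floordiv (m + 1)
      push_cast at this ⊢
      linarith [this]
    cases hr : rest with
    | nil =>
      simp only [List.foldl_nil]
      rw [hfd]
      simp only [pvTri, countOnesGo]
      ring
    | cons y r =>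
      have hy : (y == 1) = false := dropWhile_head_false _ xs y r (by rw [hrest, hr])
      have hy' : y ≠ 1 := by simpa using hy
      rw [List.foldl_cons]
      rw [show pvStep (c + 1 + (m : Int) * 1 + pvTri m, 1 + (m : Int)) y
            = (c + 1 + (m : Int) * 1 + pvTri m, 0) by simp [pvStep, hy']]
      have ihr := ih (c + 1 + (m : Int) * 1 + pvTri m)
      rw [hr, List.foldl_cons] at ihr
      rw [show pvStep (c + 1 + (m : Int) * 1 + pvTri m, 0) y
            = (c + 1 + (m : Int) * 1 + pvTri m, 0) by simp [pvStep, hy']] at ihr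
      rw [ihr, hfd]
      simp only [pvTri]
      ring
  | case3 x xs hx ih =>
    intro c
    rw [countOnesGo]
    simp only [if_neg hx]
    rw [List.foldl_cons]
    rw [show pvStep (c, 0) x = (c, 0) by simp [pvStep, hx]]
    exact ih c

-- ===== VERDICT (by name: the statement is the Claim_ definition above) =====
theorem countOnesSubArray_spec : Claim_equal_countOnesSubArray := by
  intro arr _
  show countOnesSubArray arr = countOnesSubArray_alt arr
  have h := countOnes_main arr 0
  simpa [countOnesSubArray, countOnesSubArray_alt, pvStep] using h
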